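-- pv_equiv track=rewrite | github.com/Asthanaji05/Litcoder | Python/Contests/Keeping Secret.py | people_know_secret
-- ===== SOURCE A (Python) =====
-- def people_know_secret(n, delay, forget):
--     # Array to keep track of the number of people who know the secret on each day
--     people = [0] * (n + 1)
--     people[1] = 1  # On day 1, one person knows the secret
--
--     for day in range(1, n + 1):
--         if people[day] > 0:
--             # Spread the secret to new people starting from 'day + delay' to 'day + forget - 1'
--             for spread_day in range(day + delay, min(day + forget, n + 1)):
--                 people[spread_day] += people[day]
--
--     # Sum up the number of people who still remember the secret at the end of day n
--     total_people = sum(people[max(1, n - forget + 1):n + 1])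
--     return total_people
-- ===== SOURCE B (Python) =====
-- def people_know_secret(n, delay, forget):
--     # prefix-sum dynamic programming: pref[k] = number of people who have
--     # learned the secret on days 1..k; the number learning on day k is the
--     # window difference pref[k-delay] - pref[k-forget].
--     pref = [0] * (n + 1)
--     pref[1] = 1
--     for k in range(2, n + 1):
--         lo = k - forget
--         hi = k - delay
--         if lo < hi:
--             new_k = pref[min(max(hi, 0), k - 1)] - pref[min(max(lo, 0), k - 1)]
--         else:
--             new_k = 0
--         pref[k] = pref[k - 1] + new_k
--     return pref[n] - pref[min(max(n - forget, 0), n)]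
-- ===== Notes on version B (the rewrite author's own statement) =====
-- stated objective: alternative
-- what changed: Replaces A's day-by-day simulation, which pushes each day's count onto a whole range of future days, by a one-pass prefix-sum dynamic program that pulls each day's new learners as a single window difference of prefix sums and reads the answer off the final prefix sums.
-- outside the precondition, e.g. on people_know_secret(0, 1, 3): A raises IndexError, B raises IndexError; on people_know_secret(5, 0, 3): A returns 132, B returns 10; on people_know_secret(6, -2, 4): A returns 886, B returns 26
import Mathlib
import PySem

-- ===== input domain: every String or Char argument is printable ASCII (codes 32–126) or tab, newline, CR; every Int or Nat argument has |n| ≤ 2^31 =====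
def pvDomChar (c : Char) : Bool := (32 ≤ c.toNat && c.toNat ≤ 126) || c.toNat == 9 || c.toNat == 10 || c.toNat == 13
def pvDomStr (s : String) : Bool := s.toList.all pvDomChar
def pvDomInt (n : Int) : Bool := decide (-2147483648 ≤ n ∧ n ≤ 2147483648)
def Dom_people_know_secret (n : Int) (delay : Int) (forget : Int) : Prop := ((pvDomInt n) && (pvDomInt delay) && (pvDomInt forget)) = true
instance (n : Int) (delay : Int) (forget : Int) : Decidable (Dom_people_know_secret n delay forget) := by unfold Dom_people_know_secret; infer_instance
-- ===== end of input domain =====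

-- B replaces A's day-by-day range-update simulation by a prefix-sum dynamic program (objective: alternative).

-- ===== PORT A =====
-- Python list indexing/assignment `xs[i]`, `xs[i] = v`, ported by hand on O(1) arrays:
-- exact for 0 <= i (reads out of range give the unused default 0; writes out of range are no-ops,
-- as in PySem.List.pyGetD/pySetD); every index reached under Pre_ is nonnegative and in range.
def pyAGet (xs : Array Int) (i : Int) : Int :=
  if h : 0 ≤ i ∧ i.toNat < xs.size then xs[i.toNat]'h.2 else 0

def pyASet (xs : Array Int) (i : Int) (v : Int) : Array Int :=
  if 0 ≤ i then xs.setIfInBounds i.toNat v else xs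

def people_know_secret (n : Int) (delay : Int) (forget : Int) : Int :=
  -- people = [0] * (n + 1); people[1] = 1
  let people0 := pyASet (Array.replicate (n + 1).toNat (0 : Int)) 1 1
  -- for day in range(1, n + 1): if people[day] > 0:
  --   for spread_day in range(day + delay, min(day + forget, n + 1)): people[spread_day] += people[day]
  let people := (PySem.List.pyRange 1 (n + 1) 1).foldl (fun p day =>
    if pyAGet p day > 0 then
      (PySem.List.pyRange (day + delay) (min (day + forget) (n + 1)) 1).foldl
        (fun q s => pyASet q s (pyAGet q s + pyAGet q day)) p
    else p) people0
  -- sum(people[max(1, n - forget + 1):n + 1])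
  (PySem.List.slice people.toList (some (max 1 (n - forget + 1))) (some (n + 1))).sum

-- ===== PORT B =====
def people_know_secret_alt (n : Int) (delay : Int) (forget : Int) : Int :=
  -- pref = [0] * (n + 1); pref[1] = 1
  let pref0 := pyASet (Array.replicate (n + 1).toNat (0 : Int)) 1 1
  -- for k in range(2, n + 1): window difference of prefix sums
  let pref := (PySem.List.pyRange 2 (n + 1) 1).foldl (fun p k =>
    let lo := k - forget
    let hi := k - delay
    let newk := if lo < hi then
        pyAGet p (min (max hi 0) (k - 1)) - pyAGet p (min (max lo 0) (k - 1))
      else 0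
    pyASet p k (pyAGet p (k - 1) + newk)) pref0
  -- return pref[n] - pref[min(max(n - forget, 0), n)]
  pyAGet pref n - pyAGet pref (min (max (n - forget) 0) n)

-- ===== PRECONDITION & SPEC =====
-- Pre_ restricts to the problem's natural domain (the contest constraints are 1 <= delay < forget <= n,
-- relaxed here to all inputs where spreading runs forward or not at all): for n <= 0, and for very negative
-- delay with delay < forget, A raises IndexError; for delay <= 0 with delay < forget A's returned value is an
-- artefact of same-day in-place doubling and negative-index wraparound that no caller would specify.
def Pre_people_know_secret (n : Int) (delay : Int) (forget : Int) : Prop :=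
  1 ≤ n ∧ (1 ≤ delay ∨ forget ≤ delay)
instance (n : Int) (delay : Int) (forget : Int) : Decidable (Pre_people_know_secret n delay forget) := by
  unfold Pre_people_know_secret; infer_instance
def pvWitness_people_know_secret : Int × Int × Int := (5, 1, 3)

def Spec_people_know_secret (n : Int) (delay : Int) (forget : Int) (out : Int) : Prop := out = people_know_secret_alt n delay forget
instance (n : Int) (delay : Int) (forget : Int) (out : Int) : Decidable (Spec_people_know_secret n delay forget out) := by unfold Spec_people_know_secret; infer_instance

-- ===== CLAIM (what is proved, stated in full; the proofs are below) =====
def Claim_equal_people_know_secret : Prop := ∀ (n : Int) (delay : Int) (forget : Int), Dom_people_know_secret n delay forget → Pre_people_know_secret n delay forget → Spec_people_know_secret n delay forget (people_know_secret n delay forget)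

-- ===== LEMMAS AND PROOFS =====

-- `gsec delay forget k` = number of people who FIRST learn the secret on day k (0 for k ≤ 0).
def gsec (delay forget : Int) (k : Int) : Int :=
  if k ≤ 1 then (if k = 1 then 1 else 0)
  else ((PySem.List.pyRange 1 k 1).attach.map (fun j =>
      if k - forget + 1 ≤ j.1 ∧ j.1 ≤ k - delay then gsec delay forget j.1 else 0)).sum
termination_by k.toNat
decreasing_by
  rcases (PySem.List.mem_pyRange_one).mp j.2 with ⟨h1, h2⟩
  omega

-- prefix sums of gsec
def psum (delay forget : Int) (j : Int) : Int :=
  ((PySem.List.pyRange 1 (j + 1) 1).map (gsec delay forget)).sum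

lemma gsec_eq (delay forget k : Int) (h : ¬ k ≤ 1) :
    gsec delay forget k = ((PySem.List.pyRange 1 k 1).map (fun j =>
      if k - forget + 1 ≤ j ∧ j ≤ k - delay then gsec delay forget j else 0)).sum := by
  rw [gsec, if_neg h]
  exact congrArg List.sum
    (List.attach_map_val (f := fun j => if k - forget + 1 ≤ j ∧ j ≤ k - delay then gsec delay forget j else 0))

lemma gsec_le_one (delay forget k : Int) (h : k ≤ 1) :
    gsec delay forget k = if k = 1 then 1 else 0 := by
  rw [gsec]; simp [h]

lemma gsec_nonneg_aux (delay forget : Int) : ∀ (m : Nat), ∀ (k : Int), k.toNat ≤ m → 0 ≤ gsec delay forget k := by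
  intro m
  induction m with
  | zero =>
    intro k hk
    rw [gsec_le_one delay forget k (by omega)]
    split <;> omega
  | succ m ih =>
    intro k hk
    by_cases h : k ≤ 1
    · rw [gsec_le_one delay forget k h]; split <;> omega
    · rw [gsec_eq delay forget k h]
      apply List.sum_nonneg
      intro x hx
      rcases List.mem_map.mp hx with ⟨j, hj, rfl⟩
      rcases (PySem.List.mem_pyRange_one).mp hj with ⟨h1, h2⟩
      split
      · exact ih j (by omega)
      · omega

lemma gsec_nonneg (delay forget k : Int) : 0 ≤ gsec delay forget k :=
  gsec_nonneg_aux delay forget k.toNat k le_rfl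

lemma gsec_one (delay forget : Int) : gsec delay forget 1 = 1 := by
  rw [gsec_le_one delay forget 1 le_rfl]; simp

-- sum of a window indicator over a range = sum over the clipped subrange
lemma sum_map_ite_pyRange (f : Int → Int) (c d : Int) :
    ∀ (m : Nat) (a b : Int), (b - a).toNat ≤ m →
    ((PySem.List.pyRange a b 1).map (fun j => if c ≤ j ∧ j ≤ d then f j else 0)).sum
      = ((PySem.List.pyRange (max a c) (min b (d + 1)) 1).map f).sum := by
  intro m
  induction m with
  | zero =>
    intro a b hm
    rw [PySem.List.pyRange_one_eq_nil (by omega : b ≤ a),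
        PySem.List.pyRange_one_eq_nil (by omega : min b (d+1) ≤ max a c)]
    simp
  | succ m ih =>
    intro a b hm
    by_cases hab : b ≤ a
    · rw [PySem.List.pyRange_one_eq_nil hab,
          PySem.List.pyRange_one_eq_nil (by omega : min b (d+1) ≤ max a c)]
      simp
    · rw [PySem.List.pyRange_one_cons (by omega : a < b)]
      rw [List.map_cons, List.sum_cons, ih (a+1) b (by omega)]
      by_cases hca : c ≤ a
      · by_cases had : a ≤ d
        · have h1 : max a c = a := by omega
          have h2 : max (a+1) c = a + 1 := by omega
          rw [h1, h2, PySem.List.pyRange_one_cons (by omega : a < min b (d+1)),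
              List.map_cons, List.sum_cons]
          simp [hca, had]
        · have h1 : ((PySem.List.pyRange (max a c) (min b (d + 1)) 1).map f).sum = 0 := by
            rw [PySem.List.pyRange_one_eq_nil (by omega : min b (d+1) ≤ max a c)]; simp
          have h2 : ((PySem.List.pyRange (max (a+1) c) (min b (d + 1)) 1).map f).sum = 0 := by
            rw [PySem.List.pyRange_one_eq_nil (by omega : min b (d+1) ≤ max (a+1) c)]; simp
          rw [h1, h2]
          simp [had]
      · have h1 : max a c = c := by omega
        have h2 : max (a+1) c = c := by omega
        rw [h1, h2]
        simp [hca]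

-- psum split
lemma psum_split (delay forget a b : Int) (h1 : 0 ≤ a) (h2 : a ≤ b) :
    psum delay forget b = psum delay forget a + ((PySem.List.pyRange (a + 1) (b + 1) 1).map (gsec delay forget)).sum := by
  unfold psum
  rw [PySem.List.pyRange_one_append 1 (a+1) (b+1) (by omega) (by omega), List.map_append, List.sum_append]

lemma psum_zero (delay forget : Int) : psum delay forget 0 = 0 := by
  unfold psum
  rw [show ((0:Int)+1) = 1 by omega, PySem.List.pyRange_one_eq_nil le_rfl]
  simp

lemma psum_one (delay forget : Int) : psum delay forget 1 = 1 := by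
  unfold psum
  rw [PySem.List.pyRange_one_singleton]
  simp [gsec_one]

lemma psum_succ (delay forget k : Int) (h : 0 ≤ k) :
    psum delay forget (k + 1) = psum delay forget k + gsec delay forget (k + 1) := by
  rw [psum_split delay forget k (k+1) h (by omega), PySem.List.pyRange_one_singleton]
  simp

-- gsec as a window-difference of prefix sums (the quantity B computes each iteration)
lemma gsec_window (delay forget K : Int) (hK : 2 ≤ K) (hpre : 1 ≤ delay ∨ forget ≤ delay) :
    gsec delay forget K = if K - forget < K - delay then
        psum delay forget (min (max (K - delay) 0) (K - 1)) - psum delay forget (min (max (K - forget) 0) (K - 1))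
      else 0 := by
  by_cases hlh : K - forget < K - delay
  · -- delay < forget, hence 1 ≤ delay
    have hdel : 1 ≤ delay := by rcases hpre with h | h <;> omega
    have e1 : min (max (K - delay) 0) (K - 1) = max (K - delay) 0 := by omega
    have e2 : min (max (K - forget) 0) (K - 1) = max (K - forget) 0 := by omega
    rw [if_pos hlh, e1, e2]
    rw [gsec_eq delay forget K (by omega),
        sum_map_ite_pyRange (gsec delay forget) (K - forget + 1) (K - delay) (K - 1).toNat 1 K (by omega)]
    by_cases hhi : 0 ≤ K - delay
    · have h3 : max (K - delay) 0 = K - delay := by omega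
      have h4 : max (K - forget) 0 + 1 = max 1 (K - forget + 1) := by omega
      rw [h3, psum_split delay forget (max (K - forget) 0) (K - delay) (by omega) (by omega)]
      have h5 : min K (K - delay + 1) = K - delay + 1 := by omega
      rw [h5, h4]
      ring
    · have h3 : max (K - delay) 0 = 0 := by omega
      have h4 : max (K - forget) 0 = 0 := by omega
      rw [h3, h4, PySem.List.pyRange_one_eq_nil (by omega : min K (K - delay + 1) ≤ max 1 (K - forget + 1))]
      simp
  · rw [if_neg hlh, gsec_eq delay forget K (by omega),
        sum_map_ite_pyRange (gsec delay forget) (K - forget + 1) (K - delay) (K - 1).toNat 1 K (by omega),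
        PySem.List.pyRange_one_eq_nil (by omega : min K (K - delay + 1) ≤ max 1 (K - forget + 1))]
    simp

-- pointwise description of set/get with Int indices
lemma getD_setD (xs : List Int) (i j v : Int) (h0i : 0 ≤ i) (_hi : i < (xs.length : Int))
    (h0j : 0 ≤ j) (hj : j < (xs.length : Int)) :
    PySem.List.pyGetD (PySem.List.pySetD xs i v) j 0 = if j = i then v else PySem.List.pyGetD xs j 0 := by
  rw [PySem.List.pySetD_of_nonneg xs v h0i]
  rw [PySem.List.pyGetD_eq_getElem _ _ h0j (by simpa using hj),
      PySem.List.pyGetD_eq_getElem _ _ h0j (by simpa using hj)]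
  rw [List.getElem_set]
  by_cases h : j = i
  · simp [h]
  · have : i.toNat ≠ j.toNat := by omega
    simp [h, this]

-- bridge: the O(1) array operations agree with PySem's list semantics on nonnegative indices
lemma pyAGet_eq (xs : Array Int) (i : Int) (h0 : 0 ≤ i) :
    pyAGet xs i = PySem.List.pyGetD xs.toList i 0 := by
  unfold pyAGet
  by_cases h : i.toNat < xs.size
  · rw [dif_pos ⟨h0, h⟩, PySem.List.pyGetD_eq_getElem _ _ h0 (by rw [Array.length_toList]; omega)]
    exact (Array.getElem_toList h).symm
  · rw [dif_neg (by tauto)]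
    refine (PySem.List.pyGetD_of_none _ _ _ ?_).symm
    rw [PySem.List.pyGet?_eq_none_iff]
    unfold PySem.Raise.InRange
    rw [Array.length_toList]
    omega

lemma pyASet_eq (xs : Array Int) (i : Int) (v : Int) (h0 : 0 ≤ i) :
    (pyASet xs i v).toList = PySem.List.pySetD xs.toList i v := by
  unfold pyASet
  rw [if_pos h0, PySem.List.pySetD_of_nonneg _ _ h0, Array.toList_setIfInBounds]

-- the initial array [0]*(n+1) with people[1] = 1
def init0 (n : Int) : List Int := PySem.List.pySetD (List.replicate (n + 1).toNat (0 : Int)) 1 1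

lemma length_init0 (n : Int) : (init0 n).length = (n + 1).toNat := by
  unfold init0
  rw [PySem.List.length_pySetD, List.length_replicate]

lemma getD_init0 (n : Int) (hn : 1 ≤ n) (k : Int) (h0 : 0 ≤ k) (hk : k ≤ n) :
    PySem.List.pyGetD (init0 n) k 0 = if k = 1 then 1 else 0 := by
  unfold init0
  rw [getD_setD _ 1 k 1 (by omega) (by rw [List.length_replicate]; omega) h0
      (by rw [List.length_replicate]; omega)]
  have hz : PySem.List.pyGetD (List.replicate (n + 1).toNat (0 : Int)) k 0 = 0 := by
    rw [PySem.List.pyGetD_eq_getElem _ _ h0 (by rw [List.length_replicate]; omega)]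
    simp
  rw [hz]

-- generic: a fold whose step preserves length preserves length
lemma foldl_length_pres {f : List Int → Int → List Int}
    (h : ∀ q s, (f q s).length = q.length) :
    ∀ (L : List Int) (p : List Int), (L.foldl f p).length = p.length := by
  intro L
  induction L with
  | nil => intro p; simp
  | cons x xs ih => intro p; rw [List.foldl_cons, ih, h]

-- the inner spreading loop of A, described pointwise
lemma innerA_getD (day : Int) (h0day : 0 ≤ day) :
    ∀ (m : Nat) (a b : Int) (p : List Int), (b - a).toNat ≤ m → day < a → 0 ≤ a →
      b ≤ (p.length : Int) → day < (p.length : Int) →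
      ∀ k, 0 ≤ k → k < (p.length : Int) →
      PySem.List.pyGetD ((PySem.List.pyRange a b 1).foldl
          (fun q s => PySem.List.pySetD q s (PySem.List.pyGetD q s 0 + PySem.List.pyGetD q day 0)) p) k 0
        = PySem.List.pyGetD p k 0 + (if a ≤ k ∧ k < b then PySem.List.pyGetD p day 0 else 0) := by
  intro m
  induction m with
  | zero =>
    intro a b p hm hda h0a hb hd k h0k hk
    rw [PySem.List.pyRange_one_eq_nil (by omega : b ≤ a)]
    have : ¬ (a ≤ k ∧ k < b) := by omega
    simp [this]
  | succ m ih =>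
    intro a b p hm hda h0a hb hd k h0k hk
    by_cases hab : b ≤ a
    · rw [PySem.List.pyRange_one_eq_nil hab]
      have : ¬ (a ≤ k ∧ k < b) := by omega
      simp [this]
    · rw [PySem.List.pyRange_one_cons (by omega : a < b), List.foldl_cons]
      set p' := PySem.List.pySetD p a (PySem.List.pyGetD p a 0 + PySem.List.pyGetD p day 0) with hp'
      have hlen : p'.length = p.length := PySem.List.length_pySetD p a _
      rw [ih (a+1) b p' (by omega) (by omega) (by omega) (by rw [hlen]; exact hb)
          (by rw [hlen]; exact hd) k h0k (by rw [hlen]; exact hk)]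
      have hgday : PySem.List.pyGetD p' day 0 = PySem.List.pyGetD p day 0 := by
        rw [hp', getD_setD p a day _ h0a (by omega) h0day hd, if_neg (by omega : day ≠ a)]
      have hgk : PySem.List.pyGetD p' k 0 = if k = a then PySem.List.pyGetD p a 0 + PySem.List.pyGetD p day 0 else PySem.List.pyGetD p k 0 := by
        rw [hp', getD_setD p a k _ h0a (by omega) h0k hk]
      rw [hgday, hgk]
      by_cases hka : k = a
      · subst hka
        rw [if_pos rfl, if_neg (by omega : ¬ (k + 1 ≤ k ∧ k < b)), if_pos (by omega : k ≤ k ∧ k < b)]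
        omega
      · rw [if_neg hka]
        by_cases hc : a + 1 ≤ k ∧ k < b
        · rw [if_pos hc, if_pos (by omega : a ≤ k ∧ k < b)]
        · rw [if_neg hc, if_neg (by omega : ¬ (a ≤ k ∧ k < b))]

-- the loop bodies of the two ports, named
def bodyA (n delay forget : Int) (p : List Int) (day : Int) : List Int :=
  if PySem.List.pyGetD p day 0 > 0 then
    (PySem.List.pyRange (day + delay) (min (day + forget) (n + 1)) 1).foldl
      (fun q s => PySem.List.pySetD q s (PySem.List.pyGetD q s 0 + PySem.List.pyGetD q day 0)) p
  else p

def bodyB (_n delay forget : Int) (p : List Int) (k : Int) : List Int :=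
  PySem.List.pySetD p k (PySem.List.pyGetD p (k - 1) 0 +
    (if k - forget < k - delay then
        PySem.List.pyGetD p (min (max (k - delay) 0) (k - 1)) 0
          - PySem.List.pyGetD p (min (max (k - forget) 0) (k - 1)) 0
      else 0))

lemma foldB_toList (n delay forget : Int) :
    ∀ (L : List Int), (∀ x ∈ L, 2 ≤ x) → ∀ (p : Array Int),
    (L.foldl (fun p k =>
        pyASet p k (pyAGet p (k - 1) +
          (if k - forget < k - delay then
              pyAGet p (min (max (k - delay) 0) (k - 1)) - pyAGet p (min (max (k - forget) 0) (k - 1))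
            else 0))) p).toList
      = L.foldl (bodyB n delay forget) p.toList := by
  intro L
  induction L with
  | nil => intro _ p; rfl
  | cons x xs ih =>
    intro hmem p
    have hx : 2 ≤ x := hmem x List.mem_cons_self
    rw [List.foldl_cons, List.foldl_cons, ih (fun y hy => hmem y (List.mem_cons_of_mem x hy))]
    congr 1
    unfold bodyB
    rw [← pyASet_eq _ _ _ (by omega), ← pyAGet_eq _ _ (by omega),
        ← pyAGet_eq _ _ (by omega : (0:Int) ≤ min (max (x - delay) 0) (x - 1)),
        ← pyAGet_eq _ _ (by omega : (0:Int) ≤ min (max (x - forget) 0) (x - 1))]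

lemma innerA_toList (n delay forget day : Int) (h0day : 0 ≤ day) :
    ∀ (L : List Int), (∀ x ∈ L, 0 ≤ x) → ∀ (p : Array Int),
    (L.foldl (fun q s => pyASet q s (pyAGet q s + pyAGet q day)) p).toList
      = L.foldl (fun q s => PySem.List.pySetD q s (PySem.List.pyGetD q s 0 + PySem.List.pyGetD q day 0)) p.toList := by
  intro L
  induction L with
  | nil => intro _ p; rfl
  | cons x xs ih =>
    intro hmem p
    have hx : 0 ≤ x := hmem x List.mem_cons_self
    rw [List.foldl_cons, List.foldl_cons, ih (fun y hy => hmem y (List.mem_cons_of_mem x hy))]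
    congr 1
    rw [← pyASet_eq _ _ _ hx, ← pyAGet_eq _ _ hx, ← pyAGet_eq _ _ h0day]

lemma foldA_toList (n delay forget : Int) (hpre : 1 ≤ delay ∨ forget ≤ delay) :
    ∀ (L : List Int), (∀ x ∈ L, 1 ≤ x) → ∀ (p : Array Int),
    (L.foldl (fun p day =>
        if pyAGet p day > 0 then
          (PySem.List.pyRange (day + delay) (min (day + forget) (n + 1)) 1).foldl
            (fun q s => pyASet q s (pyAGet q s + pyAGet q day)) p
        else p) p).toList
      = L.foldl (bodyA n delay forget) p.toList := by
  intro L
  induction L with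
  | nil => intro _ p; rfl
  | cons x xs ih =>
    intro hmem p
    have hx : 1 ≤ x := hmem x List.mem_cons_self
    rw [List.foldl_cons, List.foldl_cons, ih (fun y hy => hmem y (List.mem_cons_of_mem x hy))]
    congr 1
    unfold bodyA
    rw [← pyAGet_eq _ _ (by omega)]
    by_cases hguard : pyAGet p x > 0
    · rw [if_pos hguard, if_pos hguard]
      rcases hpre with hd | hfd
      · exact innerA_toList n delay forget x (by omega) _
          (fun y hy => by rcases (PySem.List.mem_pyRange_one).mp hy with ⟨h1, h2⟩; omega) p
      · rw [PySem.List.pyRange_one_eq_nil (by omega : min (x + forget) (n + 1) ≤ x + delay)]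
        rfl
    · rw [if_neg hguard, if_neg hguard]

lemma people_know_secret_eq (n delay forget : Int) (hpre : 1 ≤ delay ∨ forget ≤ delay) :
    people_know_secret n delay forget =
    (PySem.List.slice ((PySem.List.pyRange 1 (n + 1) 1).foldl (bodyA n delay forget) (init0 n))
      (some (max 1 (n - forget + 1))) (some (n + 1))).sum := by
  simp only [people_know_secret]
  congr 1
  rw [foldA_toList n delay forget hpre _
      (fun y hy => by rcases (PySem.List.mem_pyRange_one).mp hy with ⟨h1, h2⟩; omega)]
  congr 1
  unfold init0
  rw [pyASet_eq _ _ _ (by omega), Array.toList_replicate]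

lemma people_know_secret_alt_eq (n delay forget : Int) (hn : 1 ≤ n) :
    people_know_secret_alt n delay forget =
    PySem.List.pyGetD ((PySem.List.pyRange 2 (n + 1) 1).foldl (bodyB n delay forget) (init0 n)) n 0
      - PySem.List.pyGetD ((PySem.List.pyRange 2 (n + 1) 1).foldl (bodyB n delay forget) (init0 n))
          (min (max (n - forget) 0) n) 0 := by
  simp only [people_know_secret_alt]
  have hfold : ∀ (p : Array Int), p.toList = init0 n →
      ((PySem.List.pyRange 2 (n + 1) 1).foldl (fun p k =>
        pyASet p k (pyAGet p (k - 1) +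
          (if k - forget < k - delay then
              pyAGet p (min (max (k - delay) 0) (k - 1)) - pyAGet p (min (max (k - forget) 0) (k - 1))
            else 0))) p).toList
      = (PySem.List.pyRange 2 (n + 1) 1).foldl (bodyB n delay forget) (init0 n) := by
    intro p hp
    rw [foldB_toList n delay forget _
        (fun y hy => by rcases (PySem.List.mem_pyRange_one).mp hy with ⟨h1, h2⟩; omega), hp]
  rw [pyAGet_eq _ _ (by omega), pyAGet_eq _ _ (by omega : (0:Int) ≤ min (max (n - forget) 0) n)]
  rw [hfold _ (by unfold init0; rw [pyASet_eq _ _ _ (by omega), Array.toList_replicate])]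

lemma length_bodyA (n delay forget : Int) (p : List Int) (day : Int) :
    (bodyA n delay forget p day).length = p.length := by
  unfold bodyA
  split
  · exact foldl_length_pres (fun q s => PySem.List.length_pySetD q s _) _ p
  · rfl

lemma length_foldA (n delay forget : Int) (L : List Int) :
    (L.foldl (bodyA n delay forget) (init0 n)).length = (n + 1).toNat := by
  rw [foldl_length_pres (length_bodyA n delay forget) L (init0 n), length_init0]

lemma length_bodyB (n delay forget : Int) (p : List Int) (k : Int) :
    (bodyB n delay forget p k).length = p.length := by
  unfold bodyB
  exact PySem.List.length_pySetD _ _ _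

lemma length_foldB (n delay forget : Int) (L : List Int) :
    (L.foldl (bodyB n delay forget) (init0 n)).length = (n + 1).toNat := by
  rw [foldl_length_pres (length_bodyB n delay forget) L (init0 n), length_init0]

-- A-state value specification after the first d days
def aval (n delay forget d k : Int) : Int :=
  (if k = 1 then 1 else 0) +
  ((PySem.List.pyRange 1 (d + 1) 1).map (fun j =>
     if j + delay ≤ k ∧ k < min (j + forget) (n + 1) ∧ 0 < gsec delay forget j
     then gsec delay forget j else 0)).sum

lemma aval_zero (n delay forget k : Int) : aval n delay forget 0 k = if k = 1 then 1 else 0 := by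
  unfold aval
  rw [show ((0:Int)+1) = 1 by omega, PySem.List.pyRange_one_eq_nil le_rfl]
  simp

lemma aval_succ (n delay forget d k : Int) (hd : 0 ≤ d) :
    aval n delay forget (d + 1) k = aval n delay forget d k +
      (if d + 1 + delay ≤ k ∧ k < min (d + 1 + forget) (n + 1) ∧ 0 < gsec delay forget (d + 1)
       then gsec delay forget (d + 1) else 0) := by
  unfold aval
  rw [PySem.List.pyRange_one_succ_right (by omega : (1:Int) ≤ d + 1), List.map_append, List.sum_append]
  simp [add_assoc]

-- the value A's array holds at position `day` when day is processed is gsec day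
lemma aval_day (n delay forget : Int) (_hn : 1 ≤ n) (_hdel : 1 ≤ delay) (day : Int)
    (h1 : 1 ≤ day) (h2 : day ≤ n) :
    aval n delay forget (day - 1) day = gsec delay forget day := by
  by_cases hday1 : day = 1
  · subst hday1
    rw [gsec_one]
    unfold aval
    rw [show ((1:Int) - 1 + 1) = 1 by omega, PySem.List.pyRange_one_eq_nil le_rfl]
    simp
  · rw [gsec_eq delay forget day (by omega)]
    unfold aval
    rw [if_neg hday1, show (day - 1 + 1) = day by omega]
    have hfun : (fun j => if j + delay ≤ day ∧ day < min (j + forget) (n + 1) ∧ 0 < gsec delay forget j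
        then gsec delay forget j else 0)
        = (fun j => if day - forget + 1 ≤ j ∧ j ≤ day - delay then gsec delay forget j else 0) := by
      funext j
      by_cases hg : 0 < gsec delay forget j
      · by_cases hc : day - forget + 1 ≤ j ∧ j ≤ day - delay
        · rw [if_pos hc, if_pos (by omega)]
        · rw [if_neg hc, if_neg (by omega)]
      · have hz : gsec delay forget j = 0 := le_antisymm (by omega) (gsec_nonneg delay forget j)
        rw [if_neg (by tauto)]
        split
        · omega
        · rfl
    rw [hfun]
    omega

-- a final-array entry equals gsec (for 0 ≤ k ≤ n, delay ≥ 1)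
lemma aval_final (n delay forget : Int) (hn : 1 ≤ n) (hdel : 1 ≤ delay) (k : Int)
    (h0 : 0 ≤ k) (hk : k ≤ n) :
    aval n delay forget n k = gsec delay forget k := by
  by_cases hk1 : k ≤ 1
  · -- k = 0 or k = 1: the window sum is empty
    have hz : ((PySem.List.pyRange 1 (n + 1) 1).map (fun j =>
        if j + delay ≤ k ∧ k < min (j + forget) (n + 1) ∧ 0 < gsec delay forget j
        then gsec delay forget j else 0)).sum = 0 := by
      apply List.sum_eq_zero
      intro x hx
      rcases List.mem_map.mp hx with ⟨j, hj, rfl⟩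
      rcases (PySem.List.mem_pyRange_one).mp hj with ⟨hj1, hj2⟩
      rw [if_neg (by omega)]
    unfold aval
    rw [hz, gsec_le_one delay forget k hk1]
    omega
  · rw [gsec_eq delay forget k (by omega)]
    unfold aval
    rw [if_neg (by omega)]
    have hfun : (fun j => if j + delay ≤ k ∧ k < min (j + forget) (n + 1) ∧ 0 < gsec delay forget j
        then gsec delay forget j else 0)
        = (fun j => if k - forget + 1 ≤ j ∧ j ≤ k - delay then gsec delay forget j else 0) := by
      funext j
      by_cases hg : 0 < gsec delay forget j
      · by_cases hc : k - forget + 1 ≤ j ∧ j ≤ k - delay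
        · rw [if_pos hc, if_pos (by omega)]
        · rw [if_neg hc, if_neg (by omega)]
      · have hz : gsec delay forget j = 0 := le_antisymm (by omega) (gsec_nonneg delay forget j)
        rw [if_neg (by tauto)]
        split
        · omega
        · rfl
    rw [hfun,
        sum_map_ite_pyRange (gsec delay forget) (k - forget + 1) (k - delay) n.toNat 1 (n + 1) (by omega),
        sum_map_ite_pyRange (gsec delay forget) (k - forget + 1) (k - delay) k.toNat 1 k (by omega)]
    have : min (n + 1) (k - delay + 1) = min k (k - delay + 1) := by omega
    rw [this]
    omega

-- outer loop invariant for A (delay ≥ 1)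
lemma outerA_inv (n delay forget : Int) (hn : 1 ≤ n) (hdel : 1 ≤ delay) :
    ∀ (m : Nat), (m : Int) ≤ n → ∀ k, 0 ≤ k → k ≤ n →
      PySem.List.pyGetD ((PySem.List.pyRange 1 ((m : Int) + 1) 1).foldl (bodyA n delay forget) (init0 n)) k 0
        = aval n delay forget (m : Int) k := by
  intro m
  induction m with
  | zero =>
    intro _ k h0 hk
    rw [show (((0:Nat):Int) + 1) = 1 by norm_num, PySem.List.pyRange_one_eq_nil le_rfl, List.foldl_nil,
        getD_init0 n hn k h0 hk, show ((0:Nat):Int) = (0:Int) by norm_num, aval_zero]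
  | succ m ih =>
    intro hm k h0 hk
    have hmn : (m : Int) ≤ n := by push_cast at hm ⊢; omega
    set day : Int := (m : Int) + 1 with hday
    have hday1 : 1 ≤ day := by omega
    have hdayn : day ≤ n := by push_cast at hm; omega
    rw [show (((m + 1 : Nat) : Int) + 1) = day + 1 by push_cast; omega,
        PySem.List.pyRange_one_succ_right (by omega : (1:Int) ≤ day), List.foldl_append, List.foldl_cons, List.foldl_nil]
    set st := (PySem.List.pyRange 1 day 1).foldl (bodyA n delay forget) (init0 n) with hst
    have hstlen : st.length = (n + 1).toNat := length_foldA n delay forget _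
    have hstlenI : (st.length : Int) = n + 1 := by rw [hstlen]; omega
    have hinv : ∀ k', 0 ≤ k' → k' ≤ n → PySem.List.pyGetD st k' 0 = aval n delay forget (m : Int) k' := by
      intro k' h0' hk'
      rw [hst, show day = (m : Int) + 1 from hday]
      exact ih hmn k' h0' hk'
    have hv : PySem.List.pyGetD st day 0 = gsec delay forget day := by
      rw [hinv day (by omega) hdayn, show (m : Int) = day - 1 by omega]
      exact aval_day n delay forget hn hdel day hday1 hdayn
    show PySem.List.pyGetD (bodyA n delay forget st day) k 0 = aval n delay forget ((m:Int)+1) k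
    rw [show ((m:Int)+1) = day from hday.symm ▸ rfl]
    unfold bodyA
    by_cases hpos : PySem.List.pyGetD st day 0 > 0
    · rw [if_pos hpos]
      rw [innerA_getD day (by omega) (min (day + forget) (n + 1) - (day + delay)).toNat
            (day + delay) (min (day + forget) (n + 1)) st le_rfl (by omega) (by omega)
            (by omega) (by omega) k h0 (by omega)]
      rw [hinv k h0 hk, hv]
      rw [show day = (m : Int) + 1 from hday, aval_succ n delay forget (m : Int) k (by omega)]
      have hgpos : 0 < gsec delay forget ((m:Int)+1) := by rw [← hday, ← hv]; exact hpos
      by_cases hc : (m:Int) + 1 + delay ≤ k ∧ k < min ((m:Int) + 1 + forget) (n + 1)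
      · rw [if_pos (by omega : day + delay ≤ k ∧ k < min (day + forget) (n + 1)), if_pos ⟨hc.1, hc.2, hgpos⟩]
      · rw [if_neg (by rw [hday]; omega : ¬ (day + delay ≤ k ∧ k < min (day + forget) (n + 1))),
            if_neg (by tauto)]
    · rw [if_neg hpos]
      have hz : gsec delay forget day = 0 :=
        le_antisymm (by rw [← hv]; omega) (gsec_nonneg delay forget day)
      rw [hinv k h0 hk, show day = (m : Int) + 1 from hday, aval_succ n delay forget (m : Int) k (by omega)]
      rw [if_neg (by rw [← hday, hz]; intro h; exact absurd h.2.2 (by omega))]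
      omega

-- drop on pyRange
lemma pyRange_drop : ∀ (k : Nat) (a b : Int), (PySem.List.pyRange a b 1).drop k = PySem.List.pyRange (a + k) b 1 := by
  intro k
  induction k with
  | zero => intro a b; simp
  | succ k ih =>
    intro a b
    by_cases hab : b ≤ a
    · rw [PySem.List.pyRange_one_eq_nil hab, PySem.List.pyRange_one_eq_nil (by push_cast; omega)]
      simp
    · rw [PySem.List.pyRange_one_cons (by omega : a < b), List.drop_succ_cons, ih (a+1) b]
      congr 1
      push_cast
      omega

-- the T value both sides equal: total rememberers at day n
-- A-side main lemma (delay ≥ 1)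
lemma A_eq_T (n delay forget : Int) (hn : 1 ≤ n) (hdel : 1 ≤ delay) :
    people_know_secret n delay forget
      = ((PySem.List.pyRange (max 1 (n - forget + 1)) (n + 1) 1).map (gsec delay forget)).sum := by
  rw [people_know_secret_eq n delay forget (Or.inl hdel)]
  set st := (PySem.List.pyRange 1 (n + 1) 1).foldl (bodyA n delay forget) (init0 n) with hst
  have hstlen : st.length = (n + 1).toNat := length_foldA n delay forget _
  have hpe : st = (PySem.List.pyRange 0 (n + 1) 1).map (gsec delay forget) := by
    apply List.ext_getElem
    · rw [hstlen, List.length_map, PySem.List.length_pyRange_one]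
      omega
    · intro i h1 h2
      have hiI : (i : Int) ≤ n := by rw [hstlen] at h1; omega
      have : PySem.List.pyGetD st (i : Int) 0 = gsec delay forget (i : Int) := by
        rw [hst, show (n + 1) = ((n.toNat : Int) + 1) by omega]
        rw [outerA_inv n delay forget hn hdel n.toNat (by omega) (i : Int) (by omega) (by omega)]
        rw [show ((n.toNat : Int)) = n by omega]
        exact aval_final n delay forget hn hdel (i : Int) (by omega) hiI
      rw [PySem.List.pyGetD_eq_getElem _ _ (by omega) (by omega : (i:Int) < (st.length : Int))] at this
      simp only [Int.toNat_natCast] at this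
      rw [this, List.getElem_map, PySem.List.getElem_pyRange_one]
      norm_num
  rw [hpe]
  set a : Int := max 1 (n - forget + 1) with ha
  have h0a : 0 ≤ a := by omega
  rw [PySem.List.slice_toNat _ h0a (by omega : (0:Int) ≤ n + 1)]
  rw [← List.map_drop, pyRange_drop a.toNat 0 (n + 1), show ((0:Int) + (a.toNat : Int)) = a by omega]
  rw [← List.map_take, List.take_of_length_le (by rw [PySem.List.length_pyRange_one]; omega)]

-- B-side loop invariant
lemma outerB_inv (n delay forget : Int) (hn : 1 ≤ n) (hpre : 1 ≤ delay ∨ forget ≤ delay) :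
    ∀ (m : Nat), (m : Int) + 1 ≤ n → ∀ j, 0 ≤ j → j ≤ n →
      PySem.List.pyGetD ((PySem.List.pyRange 2 ((m : Int) + 2) 1).foldl (bodyB n delay forget) (init0 n)) j 0
        = if j ≤ (m : Int) + 1 then psum delay forget j else 0 := by
  intro m
  induction m with
  | zero =>
    intro _ j h0 hj
    rw [show (((0:Nat):Int) + 2) = 2 by omega, PySem.List.pyRange_one_eq_nil (by omega), List.foldl_nil,
        getD_init0 n hn j h0 hj]
    by_cases hj1 : j = 1
    · simp [hj1, psum_one]
    · by_cases hj0 : j = 0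
      · simp [hj0, psum_zero]
      · rw [if_neg hj1, if_neg (by omega)]
  | succ m ih =>
    intro hm j h0 hj
    have hmn : (m : Int) + 1 ≤ n := by push_cast at hm ⊢; omega
    set K : Int := (m : Int) + 2 with hK
    have hK2 : 2 ≤ K := by omega
    have hKn : K ≤ n := by push_cast at hm; omega
    rw [show (((m + 1 : Nat) : Int) + 2) = K + 1 by push_cast; omega,
        PySem.List.pyRange_one_succ_right (by omega : (2:Int) ≤ K), List.foldl_append, List.foldl_cons, List.foldl_nil]
    set st := (PySem.List.pyRange 2 K 1).foldl (bodyB n delay forget) (init0 n) with hst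
    have hstlen : st.length = (n + 1).toNat := length_foldB n delay forget _
    have hinv : ∀ j', 0 ≤ j' → j' ≤ n →
        PySem.List.pyGetD st j' 0 = if j' ≤ (m : Int) + 1 then psum delay forget j' else 0 := by
      intro j' h0' hj'
      rw [hst, show K = (m : Int) + 2 from hK]
      exact ih hmn j' h0' hj'
    show PySem.List.pyGetD (bodyB n delay forget st K) j 0 = _
    unfold bodyB
    have hKm1 : PySem.List.pyGetD st (K - 1) 0 = psum delay forget (K - 1) := by
      rw [hinv (K - 1) (by omega) (by omega), if_pos (by omega)]
    have hnewk : (if K - forget < K - delay then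
        PySem.List.pyGetD st (min (max (K - delay) 0) (K - 1)) 0
          - PySem.List.pyGetD st (min (max (K - forget) 0) (K - 1)) 0
      else 0) = gsec delay forget K := by
      rw [gsec_window delay forget K hK2 hpre]
      by_cases hc : K - forget < K - delay
      · rw [if_pos hc, if_pos hc,
            hinv (min (max (K - delay) 0) (K - 1)) (by omega) (by omega),
            hinv (min (max (K - forget) 0) (K - 1)) (by omega) (by omega),
            if_pos (by omega), if_pos (by omega)]
      · rw [if_neg hc, if_neg hc]
    rw [hnewk, hKm1]
    rw [getD_setD st K j _ (by omega) (by rw [hstlen]; omega) h0 (by rw [hstlen]; omega)]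
    by_cases hjK : j = K
    · rw [if_pos hjK, if_pos (by omega), hjK,
          show K = (K - 1) + 1 by omega, psum_succ delay forget (K - 1) (by omega)]
      norm_num
    · rw [if_neg hjK, hinv j h0 hj]
      by_cases hjm : j ≤ (m : Int) + 1
      · rw [if_pos hjm, if_pos (by omega)]
      · rw [if_neg hjm, if_neg (by omega)]

-- B-side main lemma (any input in Pre_)
lemma B_eq_T (n delay forget : Int) (hn : 1 ≤ n) (hpre : 1 ≤ delay ∨ forget ≤ delay) :
    people_know_secret_alt n delay forget
      = ((PySem.List.pyRange (max 1 (n - forget + 1)) (n + 1) 1).map (gsec delay forget)).sum := by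
  rw [people_know_secret_alt_eq n delay forget hn]
  have hrange : (n + 1) = ((n - 1).toNat : Int) + 2 := by omega
  have hval : ∀ j, 0 ≤ j → j ≤ n →
      PySem.List.pyGetD ((PySem.List.pyRange 2 (n + 1) 1).foldl (bodyB n delay forget) (init0 n)) j 0
        = psum delay forget j := by
    intro j h0 hj
    rw [hrange, outerB_inv n delay forget hn hpre (n - 1).toNat (by omega) j h0 hj, if_pos (by omega)]
  set c : Int := min (max (n - forget) 0) n with hc
  rw [hval n (by omega) le_rfl, hval c (by omega) (by omega)]
  by_cases hf : 1 ≤ forget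
  · have hceq : c = max (n - forget) 0 := by omega
    rw [hceq, psum_split delay forget (max (n - forget) 0) n (by omega) (by omega),
        show max (n - forget) 0 + 1 = max 1 (n - forget + 1) by omega]
    ring
  · have hceq : c = n := by omega
    rw [hceq, PySem.List.pyRange_one_eq_nil (by omega : n + 1 ≤ max 1 (n - forget + 1))]
    simp

-- A with no spreading at all (forget ≤ delay ≤ 0): the array never changes and the summed slice is empty
lemma A_case2 (n delay forget : Int) (hn : 1 ≤ n) (hfd : forget ≤ delay) (hd0 : delay ≤ 0) :
    people_know_secret n delay forget = 0 := by
  rw [people_know_secret_eq n delay forget (Or.inr hfd)]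
  have hbody : bodyA n delay forget = fun p _ => p := by
    funext p day
    unfold bodyA
    rw [PySem.List.pyRange_one_eq_nil (by omega : min (day + forget) (n + 1) ≤ day + delay), List.foldl_nil]
    split <;> rfl
  rw [hbody, List.foldl_fixed]
  rw [PySem.List.slice_toNat _ (by omega : (0:Int) ≤ max 1 (n - forget + 1)) (by omega : (0:Int) ≤ n + 1)]
  rw [List.drop_eq_nil_of_le (by rw [length_init0]; omega)]
  simp

-- ===== VERDICT (by name: the statement is the Claim_ definition above) =====
theorem people_know_secret_spec : Claim_equal_people_know_secret := by
  intro n delay forget hdom hpre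
  obtain ⟨hn, hp⟩ := hpre
  unfold Spec_people_know_secret
  rcases hp with hd | hfd
  · rw [A_eq_T n delay forget hn hd, B_eq_T n delay forget hn (Or.inl hd)]
  · by_cases hd1 : 1 ≤ delay
    · rw [A_eq_T n delay forget hn hd1, B_eq_T n delay forget hn (Or.inl hd1)]
    · rw [A_case2 n delay forget hn hfd (by omega), B_eq_T n delay forget hn (Or.inr hfd),
          PySem.List.pyRange_one_eq_nil (by omega : n + 1 ≤ max 1 (n - forget + 1))]
      simp
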